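-- pv_equiv track=rewrite | github.com/MbaksKwatu/Tunnel | parity-ingestion/app/extractors/equity_extractor.py | _detect_split_transaction_header
-- ===== SOURCE A (Python) =====
-- from typing import Any, List, Optional, Tuple
--
-- def _detect_split_transaction_header(lines: List[str]) -> bool:
--     """
--     Some Equity business PDFs break the column header across lines, e.g.:
--       Transacti Value Transaction Cheque
--       Narrative Debit Credit Running Balance
--       on Date Date Reference Number
--     """
--     for i, line in enumerate(lines):
--         if "Transacti" not in line:
--             continue
--         window = "\n".join(lines[i : min(i + 3, len(lines))])
--         if "on Date" in window:
--             return True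
--     return False
-- ===== SOURCE B (Python) =====
-- from typing import List
--
-- def _detect_split_transaction_header(lines: List[str]) -> bool:
--     """Single forward pass with a sliding window: 'on Date' contains no newline,
--     so it can only occur inside one line of A's 3-line join; a hit means some
--     line contains 'on Date' while it or one of the two preceding lines
--     contains 'Transacti'."""
--     seen_prev2 = seen_prev = False
--     for line in lines:
--         seen_here = "Transacti" in line
--         if "on Date" in line and (seen_here or seen_prev or seen_prev2):
--             return True
--         seen_prev2, seen_prev = seen_prev, seen_here
--     return False
-- ===== Notes on version B (the rewrite author's own statement) =====
-- stated objective: alternative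
-- what changed: Replaces the look-ahead join of up to three lines per 'Transacti' hit with a single forward pass that keeps a two-line sliding window of 'Transacti' sightings and checks 'on Date' per line, never building a joined string.
import Mathlib
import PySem

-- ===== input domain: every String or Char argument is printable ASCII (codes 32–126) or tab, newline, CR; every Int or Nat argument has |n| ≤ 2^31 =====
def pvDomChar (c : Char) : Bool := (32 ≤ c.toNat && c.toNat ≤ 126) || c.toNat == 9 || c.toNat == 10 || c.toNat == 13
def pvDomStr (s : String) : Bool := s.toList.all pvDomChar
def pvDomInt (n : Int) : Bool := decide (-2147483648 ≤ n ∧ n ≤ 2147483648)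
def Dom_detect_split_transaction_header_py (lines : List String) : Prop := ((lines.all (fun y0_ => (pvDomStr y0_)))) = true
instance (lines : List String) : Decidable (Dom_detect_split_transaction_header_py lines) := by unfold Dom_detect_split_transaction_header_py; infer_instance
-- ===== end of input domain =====

-- B replaces A's per-hit 3-line join with one forward pass keeping a two-line sliding window; same results, no joined strings.


-- ===== PORT A =====
def detect_split_transaction_header_py (lines : List String) : Bool :=
  (PySem.List.enumerate lines 0).any (fun p =>
    if PySem.Str.isIn "Transacti" p.2 then
      PySem.Str.isIn "on Date"
        (PySem.Str.join "\n"
          (PySem.List.slice lines (some p.1) (some (min (p.1 + 3) (PySem.List.len lines)))))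
    else false)

-- ===== PORT B =====
def pvAltGo (seenPrev2 seenPrev : Bool) : List String → Bool
  | [] => false
  | l :: rest =>
    let seenHere := PySem.Str.isIn "Transacti" l
    if PySem.Str.isIn "on Date" l && (seenHere || seenPrev || seenPrev2) then true
    else pvAltGo seenPrev seenHere rest

def detect_split_transaction_header_py_alt (lines : List String) : Bool :=
  pvAltGo false false lines

-- ===== PRECONDITION & SPEC =====
def Spec_detect_split_transaction_header_py (lines : List String) (out : Bool) : Prop := out = detect_split_transaction_header_py_alt lines
instance (lines : List String) (out : Bool) : Decidable (Spec_detect_split_transaction_header_py lines out) := by unfold Spec_detect_split_transaction_header_py; infer_instance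

-- ===== CLAIM (what is proved, stated in full; the proofs are below) =====
def Claim_equal_detect_split_transaction_header_py : Prop := ∀ (lines : List String), Dom_detect_split_transaction_header_py lines → Spec_detect_split_transaction_header_py lines (detect_split_transaction_header_py lines)

-- ===== LEMMAS AND PROOFS =====

-- a needle not containing c is a prefix of a ++ c :: b iff it is a prefix of a
lemma pv_prefix_append_cons {α : Type} (p : List α) (c : α) (a b : List α) (hc : c ∉ p) :
    p <+: a ++ c :: b ↔ p <+: a := by
  constructor
  · intro h
    have hlen : p.length ≤ a.length := by
      by_contra hlt
      have hi : a.length < p.length := by omega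
      have hget : p[a.length]'hi = (a ++ c :: b)[a.length]'(by simp) :=
        h.getElem hi
      have hval : (a ++ c :: b)[a.length]'(by simp) = c := by
        rw [List.getElem_append_right (le_refl a.length)]; simp
      have hm : c ∈ p := by rw [← hval, ← hget]; exact p.getElem_mem hi
      exact hc hm
    rw [List.prefix_iff_eq_take] at h ⊢
    rwa [List.take_append_of_le_length hlen] at h
  · intro h
    exact h.trans (List.prefix_append a (c :: b))

-- a needle not containing c is an infix of a ++ c :: b iff it is an infix of a or of b
lemma pv_infix_append_cons {α : Type} (p : List α) (c : α) (a b : List α) (hc : c ∉ p) :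
    p <:+: a ++ c :: b ↔ p <:+: a ∨ p <:+: b := by
  induction a with
  | nil =>
    rw [List.nil_append, List.infix_cons_iff]
    have hp := pv_prefix_append_cons p c [] b hc
    rw [List.nil_append] at hp
    rw [hp]
    simp [List.prefix_nil, List.infix_nil]
  | cons x a' ih =>
    rw [List.cons_append, List.infix_cons_iff, ih]
    have hp := pv_prefix_append_cons p c (x :: a') b hc
    rw [List.cons_append] at hp
    rw [hp, ← or_assoc, ← List.infix_cons_iff]

-- 'nd in "\n".join(parts)' is 'nd in some part' when nd is nonempty and newline-free
lemma pv_isIn_join (nd : List Char) (hne : nd ≠ []) (hc : '\n' ∉ nd) (parts : List (List Char)) :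
    PySem.Chars.isIn nd (PySem.Chars.join ['\n'] parts) = true ↔
      ∃ q ∈ parts, PySem.Chars.isIn nd q = true := by
  induction parts with
  | nil =>
    simp [PySem.Chars.join_nil, PySem.Chars.isIn_iff_infix, List.infix_nil, hne]
  | cons x rest ih =>
    cases rest with
    | nil => simp [PySem.Chars.join_singleton]
    | cons y r =>
      rw [PySem.Chars.join_cons_cons]
      have heq : x ++ ['\n'] ++ PySem.Chars.join ['\n'] (y :: r)
          = x ++ '\n' :: PySem.Chars.join ['\n'] (y :: r) := by simp
      rw [heq, PySem.Chars.isIn_iff_infix, pv_infix_append_cons nd '\n' _ _ hc,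
        ← PySem.Chars.isIn_iff_infix, ← PySem.Chars.isIn_iff_infix, ih]
      simp only [List.mem_cons]
      constructor
      · rintro (h | ⟨q, hq, h⟩)
        · exact ⟨x, Or.inl rfl, h⟩
        · exact ⟨q, Or.inr hq, h⟩
      · rintro ⟨q, (rfl | hq), h⟩
        · exact Or.inl h
        · exact Or.inr ⟨q, hq, h⟩

-- the common characterisation both programs compute
def pvGood (lines : List String) : Prop :=
  ∃ i j : Nat, ∃ _ : i < lines.length, ∃ _ : j < lines.length,
    i ≤ j ∧ j ≤ i + 2 ∧
    PySem.Str.isIn "Transacti" lines[i] = true ∧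
    PySem.Str.isIn "on Date" lines[j] = true

-- A's joined 3-line window holds "on Date" iff one of lines[k..k+2] does
lemma pv_window_iff (lines : List String) (k : Nat) :
    PySem.Str.isIn "on Date"
        (PySem.Str.join "\n"
          (PySem.List.slice lines (some ((0 : Int) + (k : Nat)))
            (some (min ((0 : Int) + (k : Nat) + 3) (PySem.List.len lines))))) = true
      ↔ ∃ j : Nat, ∃ _ : j < lines.length, k ≤ j ∧ j ≤ k + 2 ∧
          PySem.Str.isIn "on Date" lines[j] = true := by
  have h0 : (0 : Int) + (k : Nat) = ((k : Nat) : Int) := by ring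
  rw [h0]
  have hmin : min (((k : Nat) : Int) + 3) (PySem.List.len lines)
      = ((min (k + 3) lines.length : Nat) : Int) := by
    rw [PySem.List.len_eq]; omega
  rw [hmin, PySem.List.slice_natCast, PySem.Str.isIn_eq, PySem.Str.toList_join]
  have hsep : ("\n" : String).toList = ['\n'] := rfl
  rw [hsep, pv_isIn_join _ (by decide) (by decide)]
  constructor
  · rintro ⟨q, hq, hqin⟩
    rw [List.mem_map] at hq
    obtain ⟨s, hs, rfl⟩ := hq
    rw [List.mem_iff_getElem] at hs
    obtain ⟨d, hd, rfl⟩ := hs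
    have hdb : d < min (k + 3) lines.length - k ∧ k + d < lines.length := by
      simp [List.length_take, List.length_drop] at hd; omega
    refine ⟨k + d, by omega, by omega, by omega, ?_⟩
    rw [PySem.Str.isIn_eq]
    rw [List.getElem_take, List.getElem_drop] at hqin
    exact hqin
  · rintro ⟨j, hj, hkj, hjk, hin⟩
    refine ⟨lines[j].toList, ?_, by rw [← PySem.Str.isIn_eq]; exact hin⟩
    rw [List.mem_map]
    refine ⟨lines[j], ?_, rfl⟩
    rw [List.mem_iff_getElem]
    refine ⟨j - k, by simp [List.length_take, List.length_drop]; omega, ?_⟩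
    rw [List.getElem_take, List.getElem_drop]
    congr 1
    omega

lemma pv_A_iff (lines : List String) :
    detect_split_transaction_header_py lines = true ↔ pvGood lines := by
  unfold detect_split_transaction_header_py pvGood
  rw [List.any_eq_true]
  constructor
  · rintro ⟨p, hp, hpred⟩
    rw [PySem.List.mem_enumerate_iff] at hp
    obtain ⟨k, hk, rfl⟩ := hp
    by_cases ht : PySem.Str.isIn "Transacti" lines[k] = true
    · rw [if_pos ht] at hpred
      rw [pv_window_iff lines k] at hpred
      obtain ⟨j, hj, hkj, hjk, hin⟩ := hpred
      exact ⟨k, j, hk, hj, hkj, hjk, ht, hin⟩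
    · rw [if_neg ht] at hpred
      exact absurd hpred (by simp)
  · rintro ⟨i, j, hi, hj, hij, hji, ht, hd⟩
    refine ⟨((0 : Int) + (i : Nat), lines[i]), ?_, ?_⟩
    · rw [PySem.List.mem_enumerate_iff]
      exact ⟨i, hi, rfl⟩
    · rw [if_pos ht, pv_window_iff lines i]
      exact ⟨j, hj, hij, hji, hd⟩

lemma pvAltGo_cons (a b : Bool) (l : String) (rest : List String) :
    pvAltGo a b (l :: rest) =
      if PySem.Str.isIn "on Date" l &&
          (PySem.Str.isIn "Transacti" l || b || a) then true
      else pvAltGo b (PySem.Str.isIn "Transacti" l) rest := rfl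

lemma pv_altGo_iff (a b : Bool) (ls : List String) :
    pvAltGo a b ls = true ↔
      ∃ j : Nat, ∃ _ : j < ls.length,
        PySem.Str.isIn "on Date" ls[j] = true ∧
        ((∃ i : Nat, ∃ _ : i < ls.length, i ≤ j ∧ j ≤ i + 2 ∧
            PySem.Str.isIn "Transacti" ls[i] = true)
          ∨ (j = 0 ∧ (a = true ∨ b = true)) ∨ (j = 1 ∧ b = true)) := by
  induction ls generalizing a b with
  | nil => simp [pvAltGo]
  | cons l rest ih =>
    rw [pvAltGo_cons]
    split_ifs with hcond
    · simp only [Bool.and_eq_true, Bool.or_eq_true] at hcond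
      obtain ⟨hd, hwin⟩ := hcond
      constructor
      · intro _
        refine ⟨0, by simp, by simpa using hd, ?_⟩
        rcases hwin with (ht | hb) | ha
        · exact Or.inl ⟨0, by simp, le_refl 0, by omega, by simpa using ht⟩
        · exact Or.inr (Or.inl ⟨rfl, Or.inr hb⟩)
        · exact Or.inr (Or.inl ⟨rfl, Or.inl ha⟩)
      · intro _; rfl
    · simp only [Bool.and_eq_true, Bool.or_eq_true, not_and, not_or] at hcond
      rw [ih]
      constructor
      · rintro ⟨j', hj', hd, hwin⟩
        refine ⟨j' + 1, by simpa using Nat.succ_lt_succ hj', by simpa using hd, ?_⟩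
        rcases hwin with ⟨i'', hi'', h1, h2, ht⟩ | ⟨rfl, hb | htl⟩ | ⟨rfl, htl⟩
        · exact Or.inl ⟨i'' + 1, by simp; omega, by omega, by omega, by simpa using ht⟩
        · exact Or.inr (Or.inr ⟨rfl, hb⟩)
        · exact Or.inl ⟨0, by simp, by omega, by omega, by simpa using htl⟩
        · exact Or.inl ⟨0, by simp, by omega, by omega, by simpa using htl⟩
      · rintro ⟨j, hj, hd, hwin⟩
        cases j with
        | zero =>
          exfalso
          have hd' : PySem.Str.isIn "on Date" l = true := by simpa using hd
          have := hcond hd'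
          rcases hwin with ⟨i, hi, h1, h2, ht⟩ | ⟨_, ha | hb⟩ | ⟨h01, _⟩
          · interval_cases i
            exact this.1.1 (by simpa using ht)
          · exact this.2 ha
          · exact this.1.2 hb
          · exact absurd h01 (by omega)
        | succ j' =>
          refine ⟨j', by simpa using Nat.lt_of_succ_lt_succ hj, by simpa using hd, ?_⟩
          rcases hwin with ⟨i, hi, h1, h2, ht⟩ | ⟨h0, _⟩ | ⟨h1', hb⟩
          · cases i with
            | zero =>
              have htl : PySem.Str.isIn "Transacti" l = true := by simpa using ht
              have hj'le : j' ≤ 1 := by omega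
              interval_cases j'
              · exact Or.inr (Or.inl ⟨rfl, Or.inr htl⟩)
              · exact Or.inr (Or.inr ⟨rfl, htl⟩)
            | succ i'' =>
              have hi' : i'' < rest.length := by simp [List.length_cons] at hi; omega
              exact Or.inl ⟨i'', hi', by omega, by omega, by simpa using ht⟩
          · exact absurd h0 (by omega)
          · have : j' = 0 := by omega
            exact Or.inr (Or.inl ⟨this, Or.inl hb⟩)

lemma pv_B_iff (lines : List String) :
    detect_split_transaction_header_py_alt lines = true ↔ pvGood lines := by
  unfold detect_split_transaction_header_py_alt pvGood
  rw [pv_altGo_iff]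
  constructor
  · rintro ⟨j, hj, hd, hwin⟩
    rcases hwin with ⟨i, hi, h1, h2, ht⟩ | ⟨_, h | h⟩ | ⟨_, h⟩ <;>
      first
        | exact ⟨i, j, hi, hj, h1, h2, ht, hd⟩
        | exact absurd h (by simp)
  · rintro ⟨i, j, hi, hj, hij, hji, ht, hd⟩
    exact ⟨j, hj, hd, Or.inl ⟨i, hi, hij, hji, ht⟩⟩

-- ===== VERDICT (by name: the statement is the Claim_ definition above) =====
theorem detect_split_transaction_header_py_spec : Claim_equal_detect_split_transaction_header_py := by
  intro lines _
  unfold Spec_detect_split_transaction_header_py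
  by_cases h : pvGood lines
  · rw [(pv_A_iff lines).mpr h, ((pv_B_iff lines).mpr h)]
  · have ha := (pv_A_iff lines).not.mpr h
    have hb := (pv_B_iff lines).not.mpr h
    simp only [Bool.not_eq_true] at ha hb
    rw [ha, hb]
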